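-- pv_equiv track=rewrite | github.com/nivan/caminhosDiagonais | util.py | normalizeEntry
-- ===== SOURCE A (Python) =====
-- def normalizeEntry(entry):
--     _min = entry[0]
--     _index = 0
--
--     for i in range(len(entry)):
--         if entry[i] < _min:
--             _min = entry[i]
--             _index = i
--
--     return entry[_index:] + entry[0:_index]
-- ===== SOURCE B (Python) =====
-- def normalizeEntry(entry):
--     order = sorted(range(len(entry)), key=lambda j: (entry[j], j))
--     i = order[0]
--     return entry[i:] + entry[:i]
-- ===== Notes on version B (the rewrite author's own statement) =====
-- stated objective: alternative
-- what changed: Replaces A's single-pass running-argmin loop with a sort: B sorts the list of indices by the key (value, index) and rotates the list at the first index of that sorted order.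
import Mathlib
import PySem

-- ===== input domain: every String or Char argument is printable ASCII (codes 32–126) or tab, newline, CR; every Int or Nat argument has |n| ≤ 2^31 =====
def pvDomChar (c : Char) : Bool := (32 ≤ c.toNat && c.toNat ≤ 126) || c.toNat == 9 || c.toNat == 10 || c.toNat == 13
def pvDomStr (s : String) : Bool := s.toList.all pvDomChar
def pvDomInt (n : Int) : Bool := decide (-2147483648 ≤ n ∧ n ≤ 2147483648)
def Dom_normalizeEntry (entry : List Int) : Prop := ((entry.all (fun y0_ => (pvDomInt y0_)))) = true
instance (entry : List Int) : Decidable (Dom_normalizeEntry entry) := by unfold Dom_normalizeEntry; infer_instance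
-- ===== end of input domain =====

-- B sorts the index list by the key (value, index) and rotates at the head of that order,
-- replacing A's running-argmin loop by a sort (alternative algorithm; same return value).

-- ===== PORT A =====
-- A's loop over range(len(entry)) keeping the running (_min, _index); entry[0] raises on [] (excluded by Pre_).
def normalizeEntry (entry : List Int) : List Int :=
  match PySem.List.pyGet? entry 0 with
  | none => []   -- Python raises IndexError here; outside Pre_
  | some m0 =>
    let st := (PySem.List.pyRange 0 entry.length 1).foldl
      (fun (s : Int × Int) i =>
        if PySem.List.pyGetD entry i 0 < s.1 then (PySem.List.pyGetD entry i 0, i) else s)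
      (m0, 0)
    PySem.List.slice entry (some st.2) none ++ PySem.List.slice entry (some 0) (some st.2)

-- ===== PORT B =====
-- sorted(range(len(entry)), key=lambda j: (entry[j], j)) is sorted2 with tuple key; order[0] raises on [].
def normalizeEntry_alt (entry : List Int) : List Int :=
  let order := PySem.List.sorted2 (PySem.List.pyRange 0 entry.length 1)
    (fun j => PySem.List.pyGetD entry j 0) (fun j => j)
  match PySem.List.pyGet? order 0 with
  | none => []   -- Python raises IndexError here; outside Pre_
  | some i =>
    PySem.List.slice entry (some i) none ++ PySem.List.slice entry (some 0) (some i)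

-- ===== PRECONDITION & SPEC =====
-- Pre_ excludes only the empty list, on which Python A raises IndexError (entry[0]).
def Pre_normalizeEntry (entry : List Int) : Prop := entry ≠ []
instance (entry : List Int) : Decidable (Pre_normalizeEntry entry) := by unfold Pre_normalizeEntry; infer_instance
def pvWitness_normalizeEntry : List Int := [3, 1, 2, 1]

def Spec_normalizeEntry (entry : List Int) (out : List Int) : Prop := out = normalizeEntry_alt entry
instance (entry : List Int) (out : List Int) : Decidable (Spec_normalizeEntry entry out) := by unfold Spec_normalizeEntry; infer_instance

-- ===== CLAIM (what is proved, stated in full; the proofs are below) =====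
def Claim_equal_normalizeEntry : Prop := ∀ (entry : List Int), Dom_normalizeEntry entry → Pre_normalizeEntry entry → Spec_normalizeEntry entry (normalizeEntry entry)

-- ===== LEMMAS AND PROOFS =====

-- Invariant of A's loop after scanning the first n indices (1 ≤ n ≤ len):
-- the state is (m, k) with m the minimum of the scanned prefix and k the Int cast of its first index.
theorem normalizeEntry_fold_inv (entry : List Int) (h0 : entry ≠ []) (n : Nat)
    (h1 : 1 ≤ n) (hn : n ≤ entry.length) :
    ∃ (m : Int) (k : Nat),
      (PySem.List.pyRange 0 n 1).foldl
        (fun (s : Int × Int) i =>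
          if PySem.List.pyGetD entry i 0 < s.1 then (PySem.List.pyGetD entry i 0, i) else s)
        (entry.head h0, 0) = (m, (k : Int)) ∧
      m ∈ entry.take n ∧ (∀ y ∈ entry.take n, m ≤ y) ∧
      PySem.List.index? (entry.take n) m = some k := by
  obtain ⟨h, t, rfl⟩ := List.exists_cons_of_ne_nil h0
  induction n with
  | zero => omega
  | succ n ih =>
    by_cases hn1 : n = 0
    · subst hn1
      refine ⟨h, 0, ?_, by simp, by simp, by simp⟩
      have hr : PySem.List.pyRange 0 ((1 : Nat) : Int) 1 = [0] := by decide
      rw [hr]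
      simp [List.foldl, PySem.List.pyGetD, PySem.List.pyGet?, PySem.List.pyIdx?, List.head]
    · have hlt : n < (h :: t).length := by omega
      obtain ⟨m, k, hfold, hmem, hmin, hidx⟩ := ih (by omega) (by omega)
      have hcast : ((n + 1 : Nat) : Int) = (n : Int) + 1 := by push_cast; ring
      have hrange : PySem.List.pyRange 0 ((n : Int) + 1) 1
          = PySem.List.pyRange 0 (n : Int) 1 ++ [(n : Int)] :=
        PySem.List.pyRange_one_succ_right (by positivity)
      have hv : PySem.List.pyGetD (h :: t) (n : Int) 0 = (h :: t)[n] := by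
        rw [PySem.List.pyGetD_eq_getElem (h :: t) 0 (by positivity) (by exact_mod_cast hlt)]
        simp
      have htake : (h :: t).take (n + 1) = (h :: t).take n ++ [(h :: t)[n]] :=
        List.take_succ_eq_append_getElem hlt
      have hlen : ((h :: t).take n).length = n := by
        simp [List.length_take]; simp at hn; omega
      rw [hcast, hrange, List.foldl_append, hfold]
      simp only [List.foldl, hv]
      by_cases hc : (h :: t)[n] < m
      · refine ⟨(h :: t)[n], n, by simp [hc], ?_, ?_, ?_⟩
        · rw [htake]; exact List.mem_append.mpr (Or.inr (by simp))
        · intro y hy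
          rw [htake] at hy
          rcases List.mem_append.mp hy with hy | hy
          · exact le_of_lt (lt_of_lt_of_le hc (hmin y hy))
          · simp at hy; omega
        · have hnot : (h :: t)[n] ∉ (h :: t).take n := fun hin =>
            absurd (hmin _ hin) (not_le.mpr hc)
          rw [htake, PySem.List.index?_append_singleton_self _ _ hnot, hlen]
      · refine ⟨m, k, by simp [hc], ?_, ?_, ?_⟩
        · rw [htake]; exact List.mem_append.mpr (Or.inl hmem)
        · intro y hy
          rw [htake] at hy
          rcases List.mem_append.mp hy with hy | hy
          · exact hmin y hy
          · simp at hy; rw [hy]; exact le_of_not_gt hc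
        · rw [htake, PySem.List.index?_append_of_mem _ hmem, hidx]

-- The lexicographic "not after" relation induced by Python's tuple key (k1 j, k2 j).
def pvLexR (k1 k2 : Int → Int) (a b : Int) : Prop :=
  k1 a < k1 b ∨ (k1 a = k1 b ∧ k2 a ≤ k2 b)

theorem pvLexR_trans (k1 k2 : Int → Int) (a b c : Int)
    (hab : pvLexR k1 k2 a b) (hbc : pvLexR k1 k2 b c) : pvLexR k1 k2 a c := by
  unfold pvLexR at *; rcases hab with h | ⟨h1, h2⟩ <;> rcases hbc with g | ⟨g1, g2⟩
  · exact Or.inl (h.trans g)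
  · exact Or.inl (g1 ▸ h)
  · exact Or.inl (h1 ▸ g)
  · exact Or.inr ⟨h1.trans g1, h2.trans g2⟩

-- insertBy with sorted2's comparison preserves Pairwise pvLexR.
theorem pvPairwise_insertBy (k1 k2 : Int → Int) (x : Int) (acc : List Int)
    (hp : acc.Pairwise (pvLexR k1 k2)) :
    (PySem.List.insertBy
      (fun a b => decide (k1 a < k1 b) || (!decide (k1 b < k1 a) && decide (k2 a < k2 b)))
      x acc).Pairwise (pvLexR k1 k2) := by
  induction acc with
  | nil => simp [PySem.List.insertBy]
  | cons y ys ih =>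
    rw [List.pairwise_cons] at hp
    obtain ⟨hy, hys⟩ := hp
    unfold PySem.List.insertBy
    by_cases hb : (decide (k1 x < k1 y) || (!decide (k1 y < k1 x) && decide (k2 x < k2 y))) = true
    · simp only [hb, if_true]
      have hxy : pvLexR k1 k2 x y := by
        simp only [Bool.or_eq_true, Bool.and_eq_true, Bool.not_eq_true', decide_eq_true_eq,
          decide_eq_false_iff_not] at hb
        rcases hb with h | ⟨h1, h2⟩
        · exact Or.inl h
        · rcases lt_trichotomy (k1 x) (k1 y) with h | h | h
          · exact Or.inl h
          · exact Or.inr ⟨h, le_of_lt h2⟩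
          · exact absurd h h1
      refine List.pairwise_cons.mpr ⟨?_, List.pairwise_cons.mpr ⟨hy, hys⟩⟩
      intro z hz
      rcases hz with _ | hz
      · exact hxy
      · exact pvLexR_trans k1 k2 x y z hxy (hy _ (by assumption))
    · rw [if_neg hb]
      refine List.pairwise_cons.mpr ⟨?_, ih hys⟩
      intro z hz
      rcases (PySem.List.mem_insertBy _ _ _ _).mp hz with hzx | hz
      · -- ¬ before x y  ⇒  y comes no later than x
        rw [hzx]
        simp only [Bool.or_eq_true, Bool.and_eq_true, Bool.not_eq_true', decide_eq_true_eq,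
          decide_eq_false_iff_not, not_or, not_and] at hb
        obtain ⟨h1, h2⟩ := hb
        rcases lt_trichotomy (k1 y) (k1 x) with h | h | h
        · exact Or.inl h
        · exact Or.inr ⟨h, not_lt.mp (h2 (fun hyx => absurd hyx (h ▸ lt_irrefl _)))⟩
        · exact absurd h h1
      · exact hy z hz

theorem pvPairwise_fold (k1 k2 : Int → Int) (xs acc : List Int)
    (hp : acc.Pairwise (pvLexR k1 k2)) :
    (xs.foldl (fun acc x =>
        PySem.List.insertBy
          (fun a b => decide (k1 a < k1 b) || (!decide (k1 b < k1 a) && decide (k2 a < k2 b)))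
          x acc) acc).Pairwise (pvLexR k1 k2) := by
  induction xs generalizing acc with
  | nil => exact hp
  | cons x xs ih => exact ih _ (pvPairwise_insertBy k1 k2 x acc hp)

-- The head of sorted2 is lexicographically minimal among all elements of xs.
theorem pvSorted2_head_min (k1 k2 : Int → Int) (xs : List Int) (i : Int) (t : List Int)
    (hs : PySem.List.sorted2 xs k1 k2 = i :: t) :
    ∀ j ∈ xs, pvLexR k1 k2 i j := by
  intro j hj
  have hperm := PySem.List.sorted2_perm xs k1 k2 false
  have hjmem : j ∈ PySem.List.sorted2 xs k1 k2 := hperm.mem_iff.mpr hj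
  rw [hs] at hjmem
  have hpair : (PySem.List.sorted2 xs k1 k2).Pairwise (pvLexR k1 k2) := by
    unfold PySem.List.sorted2
    exact pvPairwise_fold k1 k2 xs [] (by simp)
  rw [hs, List.pairwise_cons] at hpair
  rcases hjmem with _ | hjt
  · exact Or.inr ⟨rfl, le_refl _⟩
  · exact hpair.1 j (by assumption)

-- ===== VERDICT (by name: the statement is the Claim_ definition above) =====
theorem normalizeEntry_spec : Claim_equal_normalizeEntry := by
  intro entry _ hpre
  unfold Spec_normalizeEntry
  obtain ⟨m, k, hfold, hmem, hmin, hidx⟩ :=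
    normalizeEntry_fold_inv entry hpre entry.length
      (by cases entry with | nil => exact absurd rfl hpre | cons a l => simp) le_rfl
  rw [List.take_length] at hmem hmin hidx
  obtain ⟨hk, hkv, hkfirst⟩ := PySem.List.getElem_of_index?_eq_some hidx
  obtain ⟨h, t, rfl⟩ := List.exists_cons_of_ne_nil hpre
  -- evaluate A
  have hget : PySem.List.pyGet? (h :: t) 0 = some h := by
    simp [PySem.List.pyGet?, PySem.List.pyIdx?]
  have hA : normalizeEntry (h :: t)
      = PySem.List.slice (h :: t) (some (k : Int)) none
        ++ PySem.List.slice (h :: t) (some 0) (some (k : Int)) := by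
    unfold normalizeEntry
    rw [hget]
    simp only []
    have : (h :: t).head hpre = h := rfl
    rw [this] at hfold
    rw [hfold]
  -- evaluate B: the sorted order is nonempty and its head is the first argmin index k
  set k1 : Int → Int := fun j => PySem.List.pyGetD (h :: t) j 0 with hk1
  set k2 : Int → Int := fun j => j with hk2
  set xs := PySem.List.pyRange 0 ((h :: t).length : Int) 1 with hxs
  obtain ⟨i, tl, hsort⟩ : ∃ i tl, PySem.List.sorted2 xs k1 k2 = i :: tl := by
    cases hc : PySem.List.sorted2 xs k1 k2 with
    | nil =>
      have h0 : (0 : Int) ∈ PySem.List.sorted2 xs k1 k2 :=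
        (PySem.List.sorted2_perm xs k1 k2 false).mem_iff.mpr (by
          rw [hxs, PySem.List.mem_pyRange_one]; constructor <;> simp)
      rw [hc] at h0; exact absurd h0 (List.not_mem_nil)
    | cons i tl => exact ⟨i, tl, rfl⟩
  have himem : i ∈ xs := by
    refine (PySem.List.sorted2_perm xs k1 k2 false).mem_iff.mp ?_
    rw [hsort]; exact List.mem_cons_self ..
  have hibd : 0 ≤ i ∧ i < ((h :: t).length : Int) := by
    rw [hxs, PySem.List.mem_pyRange_one] at himem; exact himem
  have hiNat : i = (i.toNat : Int) := (Int.toNat_of_nonneg hibd.1).symm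
  have hitlt : i.toNat < (h :: t).length := by omega
  have hkmem : (k : Int) ∈ xs := by
    rw [hxs, PySem.List.mem_pyRange_one]; exact ⟨by positivity, by exact_mod_cast hk⟩
  have hlex := pvSorted2_head_min k1 k2 xs i tl hsort (k : Int) hkmem
  have hvi : k1 i = (h :: t)[i.toNat] := by
    rw [hk1]; exact PySem.List.pyGetD_eq_getElem (h :: t) 0 hibd.1 hibd.2
  have hvk : k1 (k : Int) = m := by
    show PySem.List.pyGetD (h :: t) (k : Int) 0 = m
    rw [PySem.List.pyGetD_eq_getElem (h :: t) 0 (Int.natCast_nonneg k) (by exact_mod_cast hk)]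
    simpa using hkv
  have hik : i = (k : Int) := by
    have hmle : m ≤ (h :: t)[i.toNat] := hmin _ (List.getElem_mem hitlt)
    rcases hlex with hlt | ⟨heq, hle⟩
    · rw [hvi, hvk] at hlt; omega
    · -- equal values: i ≤ k; first-occurrence minimality forces i = k
      have hveq : (h :: t)[i.toNat] = m := by rw [← hvi, heq, hvk]
      have hile : i ≤ (k : Int) := by simpa [hk2] using hle
      by_contra hne
      have hiltk : i.toNat < k := by omega
      exact hkfirst i.toNat hiltk hveq
  have hB : normalizeEntry_alt (h :: t)
      = PySem.List.slice (h :: t) (some (k : Int)) none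
        ++ PySem.List.slice (h :: t) (some 0) (some (k : Int)) := by
    unfold normalizeEntry_alt
    simp only [← hxs, ← hk1, ← hk2]
    rw [hsort]
    have : PySem.List.pyGet? (i :: tl) 0 = some i := by
      simp [PySem.List.pyGet?, PySem.List.pyIdx?]
    rw [this, hik]
  rw [hA, hB]
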